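-- pv_equiv track=rewrite | github.com/Sebastianjaimes-sepc/Metahuristica | src/encoding_v2.py | get_route_for_client
-- ===== SOURCE A (Python) =====
-- from typing import List, Tuple
--
-- DEPOT = 0
--
-- def get_route_for_client(vector: List[int], client: int) -> Tuple[int, int]:
--     """
--     Encontrar en qué ruta (depósito) está un cliente.
--
--     Returns:
--         (numero_ruta, posicion_en_ruta)
--     """
--     route_num = 0
--     pos_in_route = 0
--     in_route = False
--
--     for node in vector:
--         if node == DEPOT:
--             if in_route:
--                 route_num += 1
--                 pos_in_route = 0
--             in_route = True
--         else:
--             if node == client: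
--                 return (route_num, pos_in_route)
--             pos_in_route += 1
--
--     return None
-- ===== SOURCE B (Python) =====
-- DEPOT = 0
--
-- def get_route_for_client(vector, client):
--     # Split the vector into depot-separated segments, then scan the segments.
--     segments = []
--     current = []
--     for node in vector:
--         if node == DEPOT:
--             segments.append(current)
--             current = []
--         else:
--             current.append(node)
--     segments.append(current)
--     # The stretch before the first depot and the first route share route
--     # number 0 and a running position, so they form one segment.
--     if len(segments) >= 2:
--         segments = [segments[0] + segments[1]] + segments[2:]
--     for i, seg in enumerate(segments):
--         for j, node in enumerate(seg):
--             if node == client: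
--                 return (i, j)
--     return None
-- ===== Notes on version B (the rewrite author's own statement) =====
-- stated objective: alternative
-- what changed: B first splits the vector into depot-separated segments (merging the pre-first-depot stretch with the first route, as A counts them as one), then searches the segments with plain nested enumerate loops, instead of A's single pass over the flat vector with route/position/in-route state.
import Mathlib
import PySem

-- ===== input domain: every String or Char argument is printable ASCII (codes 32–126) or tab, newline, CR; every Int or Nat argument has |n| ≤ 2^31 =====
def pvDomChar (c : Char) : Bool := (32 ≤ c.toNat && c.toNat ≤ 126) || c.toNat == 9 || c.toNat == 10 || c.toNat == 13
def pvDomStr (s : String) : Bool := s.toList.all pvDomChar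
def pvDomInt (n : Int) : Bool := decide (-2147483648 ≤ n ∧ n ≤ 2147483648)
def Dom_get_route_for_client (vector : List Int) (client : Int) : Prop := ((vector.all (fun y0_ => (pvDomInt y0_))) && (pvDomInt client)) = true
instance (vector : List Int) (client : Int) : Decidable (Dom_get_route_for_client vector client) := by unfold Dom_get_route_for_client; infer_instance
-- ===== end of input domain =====

-- B splits the vector into depot-separated segments (merging the pre-first-depot
-- stretch with the first route, as A counts them as one) and searches them with
-- nested loops; alternative decomposition, same cost.

-- ===== PORT A =====
-- A's single pass: state (route_num, pos_in_route, in_route), early return on a match.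
def goA (client : Int) : List Int → Int → Int → Bool → Option (Int × Int)
  | [], _, _, _ => none
  | n :: rest, r, p, inr =>
      if n == 0 then
        goA client rest (if inr then r + 1 else r) (if inr then 0 else p) true
      else if n == client then some (r, p)
      else goA client rest r (p + 1) inr

def get_route_for_client (vector : List Int) (client : Int) : Option (Int × Int) :=
  goA client vector 0 0 false

-- ===== PORT B =====
-- B's split loop: accumulate finished segments and the current segment.
def splitGo : List Int → List (List Int) → List Int → List (List Int)
  | [], segs, cur => segs ++ [cur]
  | n :: rest, segs, cur =>
      if n == 0 then splitGo rest (segs ++ [cur]) []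
      else splitGo rest segs (cur ++ [n])

-- merge the pre-first-depot segment with the first route (Source B's len>=2 branch)
def mergeFirst : List (List Int) → List (List Int)
  | a :: b :: rest => (a ++ b) :: rest
  | segs => segs

-- inner 'for j, node in enumerate(seg)'
def findIn (client : Int) : List Int → Int → Option Int
  | [], _ => none
  | n :: rest, j => if n == client then some j else findIn client rest (j + 1)

-- outer 'for i, seg in enumerate(segments)'
def searchSegs (client : Int) : List (List Int) → Int → Option (Int × Int)
  | [], _ => none
  | seg :: rest, i =>
      match findIn client seg 0 with
      | some j => some (i, j)
      | none => searchSegs client rest (i + 1)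

def get_route_for_client_alt (vector : List Int) (client : Int) : Option (Int × Int) :=
  searchSegs client (mergeFirst (splitGo vector [] [])) 0

-- ===== PRECONDITION & SPEC =====
def Spec_get_route_for_client (vector : List Int) (client : Int) (out : Option (Int × Int)) : Prop := out = get_route_for_client_alt vector client
instance (vector : List Int) (client : Int) (out : Option (Int × Int)) : Decidable (Spec_get_route_for_client vector client out) := by unfold Spec_get_route_for_client; infer_instance

-- ===== CLAIM (what is proved, stated in full; the proofs are below) =====
def Claim_equal_get_route_for_client : Prop := ∀ (vector : List Int) (client : Int), Dom_get_route_for_client vector client → Spec_get_route_for_client vector client (get_route_for_client vector client)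

-- ===== LEMMAS AND PROOFS =====

-- proof-side split: first segment and the remaining segments of the vector
def segsOf : List Int → List Int × List (List Int)
  | [] => ([], [])
  | n :: rest =>
      let (s, ss) := segsOf rest
      if n == 0 then ([], s :: ss) else (n :: s, ss)

theorem splitGo_eq (v : List Int) : ∀ (segs : List (List Int)) (cur : List Int),
    splitGo v segs cur = segs ++ (cur ++ (segsOf v).1) :: (segsOf v).2 := by
  induction v with
  | nil => intro segs cur; simp [splitGo, segsOf]
  | cons n rest ih =>
      intro segs cur
      by_cases h : n = 0
      · simp [splitGo, segsOf, h, ih]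
      · simp [splitGo, segsOf, h, ih]

theorem findIn_none (client : Int) (cur : List Int) (h : client ∉ cur) :
    ∀ j, findIn client cur j = none := by
  induction cur with
  | nil => intro j; rfl
  | cons n rest ih =>
      intro j
      simp only [List.mem_cons, not_or] at h
      simp [findIn, Ne.symm h.1, ih h.2]

theorem findIn_append (client : Int) (cur : List Int) (h : client ∉ cur) (xs : List Int) :
    ∀ j, findIn client (cur ++ xs) j = findIn client xs (j + (cur.length : Int)) := by
  induction cur with
  | nil => intro j; simp
  | cons n rest ih =>
      intro j
      simp only [List.mem_cons, not_or] at h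
      simp only [List.cons_append, findIn, Ne.symm h.1, beq_iff_eq, if_false, ih h.2,
        List.length_cons]
      congr 1
      push_cast
      omega

theorem goA_true (client : Int) (v : List Int) : ∀ (cur : List Int) (r : Int),
    client ∉ cur →
    goA client v r (cur.length : Int) true =
      searchSegs client ((cur ++ (segsOf v).1) :: (segsOf v).2) r := by
  induction v with
  | nil =>
      intro cur r h
      simp [goA, segsOf, searchSegs, findIn_none client cur h]
  | cons n rest ih =>
      intro cur r h
      obtain ⟨s, ss, hsr⟩ : ∃ s ss, segsOf rest = (s, ss) := ⟨_, _, rfl⟩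
      by_cases h0 : n = 0
      · subst h0
        have ihe := ih [] (r + 1) (by simp)
        rw [hsr] at ihe
        simp only [List.nil_append, List.length_nil, Int.ofNat_zero] at ihe
        simp [goA, segsOf, hsr, searchSegs, findIn_none client cur h, ihe]
      · have hseg : segsOf (n :: rest) = (n :: s, ss) := by simp [segsOf, hsr, h0]
        by_cases hc : n = client
        · subst hc
          simp [goA, h0, hseg, searchSegs, findIn_append _ cur h, findIn]
        · have hne : client ≠ n := fun e => hc e.symm
          have hcur : client ∉ cur ++ [n] := by simp [h, hne]
          have ihe := ih (cur ++ [n]) r hcur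
          rw [hsr] at ihe
          simp only [List.append_assoc, List.singleton_append, List.length_append,
            List.length_cons, List.length_nil] at ihe
          push_cast at ihe
          simp only [goA, beq_iff_eq, h0, hc, if_false, hseg]
          exact ihe

theorem goA_false (client : Int) (v : List Int) : ∀ (cur : List Int),
    client ∉ cur →
    goA client v 0 (cur.length : Int) false =
      searchSegs client (mergeFirst ((cur ++ (segsOf v).1) :: (segsOf v).2)) 0 := by
  induction v with
  | nil =>
      intro cur h
      simp [goA, segsOf, mergeFirst, searchSegs, findIn_none client cur h]
  | cons n rest ih =>
      intro cur h
      obtain ⟨s, ss, hsr⟩ : ∃ s ss, segsOf rest = (s, ss) := ⟨_, _, rfl⟩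
      by_cases h0 : n = 0
      · subst h0
        have ht := goA_true client rest cur 0 h
        rw [hsr] at ht
        simp [goA, segsOf, hsr, mergeFirst, ht]
      · have hseg : segsOf (n :: rest) = (n :: s, ss) := by simp [segsOf, hsr, h0]
        by_cases hc : n = client
        · subst hc
          cases ss with
          | nil =>
              simp [goA, h0, hseg, mergeFirst, searchSegs,
                findIn_append _ cur h, findIn]
          | cons b ss' =>
              simp [goA, h0, hseg, mergeFirst, searchSegs, List.append_assoc,
                List.cons_append, findIn_append _ cur h, findIn]
        · have hne : client ≠ n := fun e => hc e.symm
          have hcur : client ∉ cur ++ [n] := by simp [h, hne]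
          have ihe := ih (cur ++ [n]) hcur
          rw [hsr] at ihe
          simp only [List.append_assoc, List.singleton_append, List.length_append,
            List.length_cons, List.length_nil] at ihe
          push_cast at ihe
          simp only [goA, beq_iff_eq, h0, hc, if_false, hseg]
          exact ihe

-- ===== VERDICT (by name: the statement is the Claim_ definition above) =====
theorem get_route_for_client_spec : Claim_equal_get_route_for_client := by
  intro vector client _
  show get_route_for_client vector client = get_route_for_client_alt vector client
  have h := goA_false client vector [] (by simp)
  simp only [List.length_nil, Int.ofNat_zero, List.nil_append] at h
  rw [get_route_for_client, get_route_for_client_alt, splitGo_eq, h]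
  simp
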